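-- pv_equiv track=rewrite | github.com/YnezT0311/pros_2026_mem_follow | privacy_test/no_use/build_no_use_world.py | pick_user_turn
-- ===== SOURCE A (Python) =====
-- from typing import Dict, List, Optional, Tuple
--
-- def split_user_prefix(line: str) -> str:
--     if isinstance(line, str) and line.startswith("User:"):
--         return line[len("User:"):].strip()
--     return str(line).strip()
--
-- def pick_user_turn(lines: List[str], min_words: int = 8, avoid_idx: Optional[int] = None) -> Optional[int]:
--     cand = []
--     for i, line in enumerate(lines):
--         if avoid_idx is not None and i == avoid_idx:
--             continue
--         if not isinstance(line, str) or not line.startswith("User:"):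
--             continue
--         content = split_user_prefix(line)
--         low = content.lower()
--         if any(k in low for k in ["do not use", "for now", "you can use everything now", "restriction is over"]):
--             continue
--         if "prior conversation memory" in low or "previous conversation details" in low:
--             continue
--         if len(content.split()) < min_words:
--             continue
--         score = 0
--         if i > 0 and isinstance(lines[i - 1], str) and lines[i - 1].startswith("Side_Note"):
--             score += 2
--         if len(content.split()) >= 16:
--             score += 1
--         cand.append((score, i))
--     if not cand:
--         return None
--     cand.sort(key=lambda x: (-x[0], x[1]))
--     return cand[0][1]
-- ===== SOURCE B (Python) =====
-- from typing import List, Optional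
--
-- def split_user_prefix(line: str) -> str:
--     if isinstance(line, str) and line.startswith("User:"):
--         return line[len("User:"):].strip()
--     return str(line).strip()
--
-- def _turn_score(lines: List[str], i: int, line: str, min_words: int, avoid_idx: Optional[int]) -> Optional[int]:
--     """Return the line's score if it is a qualifying user turn, else None."""
--     if avoid_idx is not None and i == avoid_idx:
--         return None
--     if not isinstance(line, str) or not line.startswith("User:"):
--         return None
--     content = split_user_prefix(line)
--     low = content.lower()
--     if any(k in low for k in ["do not use", "for now", "you can use everything now", "restriction is over"]):
--         return None
--     if "prior conversation memory" in low or "previous conversation details" in low: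
--         return None
--     if len(content.split()) < min_words:
--         return None
--     score = 0
--     if i > 0 and isinstance(lines[i - 1], str) and lines[i - 1].startswith("Side_Note"):
--         score += 2
--     if len(content.split()) >= 16:
--         score += 1
--     return score
--
-- def pick_user_turn(lines: List[str], min_words: int = 8, avoid_idx: Optional[int] = None) -> Optional[int]:
--     best = None  # (score, index); strict '>' keeps the earliest index on ties
--     for i, line in enumerate(lines):
--         score = _turn_score(lines, i, line, min_words, avoid_idx)
--         if score is None:
--             continue
--         if best is None or score > best[0]:
--             best = (score, i)
--     return None if best is None else best[1]
-- ===== Notes on version B (the rewrite author's own statement) =====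
-- stated objective: simpler
-- what changed: B drops the candidate list and the final sort: a helper scores each line and a single pass keeps a running (best_score, best_idx) with strict '>', which reproduces sort(key=(-score,i))[0] because indices arrive in increasing order.
import Mathlib
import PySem

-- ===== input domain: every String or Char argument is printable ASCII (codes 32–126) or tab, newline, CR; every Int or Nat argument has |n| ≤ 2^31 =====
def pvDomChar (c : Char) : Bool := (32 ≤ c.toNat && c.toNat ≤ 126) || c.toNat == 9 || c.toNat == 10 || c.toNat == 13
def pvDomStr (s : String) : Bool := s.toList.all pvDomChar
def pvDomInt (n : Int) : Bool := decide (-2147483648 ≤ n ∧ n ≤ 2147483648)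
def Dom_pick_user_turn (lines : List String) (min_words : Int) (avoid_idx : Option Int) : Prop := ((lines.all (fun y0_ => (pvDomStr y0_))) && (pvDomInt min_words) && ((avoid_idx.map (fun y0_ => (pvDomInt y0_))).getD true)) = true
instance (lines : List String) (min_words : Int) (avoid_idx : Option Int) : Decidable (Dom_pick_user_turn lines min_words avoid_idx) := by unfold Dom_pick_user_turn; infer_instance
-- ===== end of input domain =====

-- B replaces A's candidate list + sort by a single pass keeping a running best (strict '>', so ties keep the earliest index): simpler, no sort.

-- ===== PORT A =====
def split_user_prefix (line : String) : String :=
  if PySem.Str.startswith line "User:" then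
    PySem.Str.strip (PySem.Str.slice line (some 5) none)
  else
    PySem.Str.strip line

def pick_user_turn (lines : List String) (min_words : Int) (avoid_idx : Option Int) : Option Int :=
  let cand := (PySem.List.enumerate lines 0).foldl (fun (cand : List (Int × Int)) p =>
    let i := p.1
    let line := p.2
    if (match avoid_idx with | some a => decide (i = a) | none => false) then cand
    else if !(PySem.Str.startswith line "User:") then cand
    else
      let content := split_user_prefix line
      let low := PySem.Str.lower content
      if (["do not use", "for now", "you can use everything now", "restriction is over"].any
            fun k => PySem.Str.isIn k low) then cand
      else if (PySem.Str.isIn "prior conversation memory" low ||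
               PySem.Str.isIn "previous conversation details" low) then cand
      else if ((PySem.Str.split₀ content).length : Int) < min_words then cand
      else
        let score : Int := 0
        let score := if (decide (0 < i) &&
            PySem.Str.startswith (PySem.List.pyGetD lines (i - 1) "") "Side_Note") then score + 2 else score
        let score := if 16 ≤ (PySem.Str.split₀ content).length then score + 1 else score
        cand ++ [(score, i)]) []
  match PySem.List.sorted2 cand (fun x => -x.1) (fun x => x.2) with
  | [] => none
  | c :: _ => some c.2

-- ===== PORT B =====
-- helper of Source B: the line's score if it is a qualifying user turn, else none
def turn_score (lines : List String) (i : Int) (line : String) (min_words : Int) (avoid_idx : Option Int) : Option Int :=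
  if (match avoid_idx with | some a => decide (i = a) | none => false) then none
  else if !(PySem.Str.startswith line "User:") then none
  else
    let content := split_user_prefix line
    let low := PySem.Str.lower content
    if (["do not use", "for now", "you can use everything now", "restriction is over"].any
          fun k => PySem.Str.isIn k low) then none
    else if (PySem.Str.isIn "prior conversation memory" low ||
             PySem.Str.isIn "previous conversation details" low) then none
    else if ((PySem.Str.split₀ content).length : Int) < min_words then none
    else
      let score : Int := 0
      let score := if (decide (0 < i) &&
          PySem.Str.startswith (PySem.List.pyGetD lines (i - 1) "") "Side_Note") then score + 2 else score
      let score := if 16 ≤ (PySem.Str.split₀ content).length then score + 1 else score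
      some score

def pick_user_turn_alt (lines : List String) (min_words : Int) (avoid_idx : Option Int) : Option Int :=
  let best := (PySem.List.enumerate lines 0).foldl (fun (best : Option (Int × Int)) p =>
    match turn_score lines p.1 p.2 min_words avoid_idx with
    | none => best
    | some score =>
      match best with
      | none => some (score, p.1)
      | some b => if b.1 < score then some (score, p.1) else some b) none
  match best with
  | none => none
  | some b => some b.2

-- ===== PRECONDITION & SPEC =====
def Spec_pick_user_turn (lines : List String) (min_words : Int) (avoid_idx : Option Int) (out : Option Int) : Prop := out = pick_user_turn_alt lines min_words avoid_idx
instance (lines : List String) (min_words : Int) (avoid_idx : Option Int) (out : Option Int) : Decidable (Spec_pick_user_turn lines min_words avoid_idx out) := by unfold Spec_pick_user_turn; infer_instance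

-- ===== CLAIM (what is proved, stated in full; the proofs are below) =====
def Claim_equal_pick_user_turn : Prop := ∀ (lines : List String) (min_words : Int) (avoid_idx : Option Int), Dom_pick_user_turn lines min_words avoid_idx → Spec_pick_user_turn lines min_words avoid_idx (pick_user_turn lines min_words avoid_idx)

-- ===== LEMMAS AND PROOFS =====

-- the per-candidate pair A appends / B tracks, as an Option
def candOf (lines : List String) (min_words : Int) (avoid_idx : Option Int) (p : Int × String) : Option (Int × Int) :=
  (turn_score lines p.1 p.2 min_words avoid_idx).map (fun s => (s, p.1))

-- A's loop step is "append (score, i) when turn_score is some"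
lemma stepA_eq (lines : List String) (min_words : Int) (avoid_idx : Option Int) :
    (fun (cand : List (Int × Int)) (p : Int × String) =>
      let i := p.1
      let line := p.2
      if (match avoid_idx with | some a => decide (i = a) | none => false) then cand
      else if !(PySem.Str.startswith line "User:") then cand
      else
        let content := split_user_prefix line
        let low := PySem.Str.lower content
        if (["do not use", "for now", "you can use everything now", "restriction is over"].any
              fun k => PySem.Str.isIn k low) then cand
        else if (PySem.Str.isIn "prior conversation memory" low ||
                 PySem.Str.isIn "previous conversation details" low) then cand
        else if ((PySem.Str.split₀ content).length : Int) < min_words then cand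
        else
          let score : Int := 0
          let score := if (decide (0 < p.1) &&
              PySem.Str.startswith (PySem.List.pyGetD lines (p.1 - 1) "") "Side_Note") then score + 2 else score
          let score := if 16 ≤ (PySem.Str.split₀ content).length then score + 1 else score
          cand ++ [(score, i)])
    = (fun cand p => match candOf lines min_words avoid_idx p with
        | none => cand
        | some x => cand ++ [x]) := by
  funext cand p
  simp only [candOf, turn_score]
  split_ifs <;> rfl

-- appending-on-some fold is filterMap
lemma foldA_filterMap (g : Int × String → Option (Int × Int)) :
    ∀ (l : List (Int × String)) (acc : List (Int × Int)),
      l.foldl (fun cand p => match g p with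
        | none => cand
        | some x => cand ++ [x]) acc = acc ++ l.filterMap g := by
  intro l
  induction l with
  | nil => intro acc; simp
  | cons x t ih =>
    intro acc
    cases h : g x <;> simp [List.foldl_cons, h, ih]

-- B's loop over the lines is the running-best fold over the candidate list
lemma foldB_filterMap (lines : List String) (min_words : Int) (avoid_idx : Option Int)
    (l : List (Int × String)) :
    l.foldl (fun (best : Option (Int × Int)) p =>
        match turn_score lines p.1 p.2 min_words avoid_idx with
        | none => best
        | some score =>
          match best with
          | none => some (score, p.1)
          | some b => if b.1 < score then some (score, p.1) else some b) none
    = (l.filterMap (candOf lines min_words avoid_idx)).foldl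
        (fun (best : Option (Int × Int)) x =>
          match best with
          | none => some x
          | some b => if b.1 < x.1 then some x else some b) none := by
  rw [List.foldl_filterMap]
  congr 1
  funext best p
  simp only [candOf]
  cases h : turn_score lines p.1 p.2 min_words avoid_idx <;> rfl

-- a running-best fold from a seeded Option is a plain pair fold
lemma optFold_some :
    ∀ (rest : List (Int × Int)) (b : Int × Int),
      rest.foldl (fun (best : Option (Int × Int)) x =>
        match best with
        | none => some x
        | some b => if b.1 < x.1 then some x else some b) (some b)
      = some (rest.foldl (fun h x => if h.1 < x.1 then x else h) b) := by
  intro rest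
  induction rest with
  | nil => intro b; rfl
  | cons x t ih =>
    intro b
    simp only [List.foldl_cons]
    by_cases h : b.1 < x.1 <;> simp [h, ih]

-- head of the insertion-sort fold is the running best, when later candidates have larger indices
lemma head_foldl_insertBy (bf : Int × Int → Int × Int → Bool)
    (hbf : ∀ x b : Int × Int, b.2 < x.2 → bf x b = decide (b.1 < x.1)) :
    ∀ (c : List (Int × Int)) (ys : List (Int × Int)) (b : Int × Int),
      ys.head? = some b → (∀ x ∈ c, b.2 < x.2) → c.Pairwise (fun p q => p.2 < q.2) →
      (c.foldl (fun acc x => PySem.List.insertBy bf x acc) ys).head? =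
        some (c.foldl (fun h x => if h.1 < x.1 then x else h) b) := by
  intro c
  induction c with
  | nil => intro ys b hh _ _; simpa using hh
  | cons x t ih =>
    intro ys b hh hlt hpw
    simp only [List.foldl_cons]
    have hx : b.2 < x.2 := hlt x (by simp)
    have hhead : (PySem.List.insertBy bf x ys).head? = some (if b.1 < x.1 then x else b) := by
      cases ys with
      | nil => simp at hh
      | cons y yt =>
        have hy : y = b := by simpa using hh
        subst hy
        show (if bf x y = true then x :: y :: yt else y :: PySem.List.insertBy bf x yt).head? = _
        rw [hbf x y hx]
        by_cases h : y.1 < x.1 <;> simp [h]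
    apply ih _ _ hhead
    · intro z hz
      by_cases h : b.1 < x.1 <;> simp only [h, if_true, if_false]
      · exact (List.pairwise_cons.mp hpw).1 z hz
      · exact lt_trans hx ((List.pairwise_cons.mp hpw).1 z hz)
    · exact (List.pairwise_cons.mp hpw).2

-- sorted2's comparator behaves as "strictly larger score" on pairs with increasing indices
lemma bf_spec (x b : Int × Int) (h : b.2 < x.2) :
    (decide (-x.1 < -b.1) || (!decide (-b.1 < -x.1) && decide (x.2 < b.2))) = decide (b.1 < x.1) := by
  have : ¬ x.2 < b.2 := not_lt.mpr (le_of_lt h)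
  simp only [this, decide_false, Bool.and_false, Bool.or_false]
  by_cases hb : b.1 < x.1 <;> simp [hb]

-- the candidate list carries strictly increasing indices
lemma cand_pairwise (lines : List String) (min_words : Int) (avoid_idx : Option Int) :
    ((PySem.List.enumerate lines 0).filterMap (candOf lines min_words avoid_idx)).Pairwise
      (fun p q : Int × Int => p.2 < q.2) := by
  rw [List.pairwise_filterMap]
  apply (PySem.List.pairwise_lt_enumerate lines 0).imp_of_mem
  intro p q _ _ hpq x hx y hy
  simp only [candOf, Option.map_eq_some_iff] at hx hy
  obtain ⟨_, _, hx2⟩ := hx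
  obtain ⟨_, _, hy2⟩ := hy
  subst hx2; subst hy2
  simpa using hpq

-- ===== VERDICT (by name: the statement is the Claim_ definition above) =====
theorem pick_user_turn_spec : Claim_equal_pick_user_turn := by
  intro lines min_words avoid_idx _
  unfold Spec_pick_user_turn pick_user_turn pick_user_turn_alt
  rw [stepA_eq lines min_words avoid_idx, foldA_filterMap, foldB_filterMap]
  simp only [List.nil_append]
  rcases hc : (PySem.List.enumerate lines 0).filterMap (candOf lines min_words avoid_idx) with
    _ | ⟨x, rest⟩
  · rfl
  · have hpw : (x :: rest).Pairwise (fun p q : Int × Int => p.2 < q.2) :=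
      hc ▸ cand_pairwise lines min_words avoid_idx
    have hsorted : (PySem.List.sorted2 (x :: rest) (fun x => -x.1) (fun x => x.2)).head? =
        some (rest.foldl (fun h x => if h.1 < x.1 then x else h) x) := by
      show ((x :: rest).foldl (fun acc y =>
          PySem.List.insertBy (fun a b =>
            decide (-a.1 < -b.1) || (!decide (-b.1 < -a.1) && decide (a.2 < b.2))) y acc) []).head? = _
      rw [List.foldl_cons]
      exact head_foldl_insertBy _ bf_spec rest (PySem.List.insertBy _ x []) x rfl
        ((List.pairwise_cons.mp hpw).1) ((List.pairwise_cons.mp hpw).2)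
    have hB : (x :: rest).foldl (fun (best : Option (Int × Int)) y =>
          match best with
          | none => some y
          | some b => if b.1 < y.1 then some y else some b) none
        = some (rest.foldl (fun h x => if h.1 < x.1 then x else h) x) := by
      rw [List.foldl_cons]
      exact optFold_some rest x
    rw [hB]
    obtain ⟨t, ht⟩ : ∃ t, PySem.List.sorted2 (x :: rest) (fun x => -x.1) (fun x => x.2)
        = (rest.foldl (fun h x => if h.1 < x.1 then x else h) x) :: t := by
      cases hs : PySem.List.sorted2 (x :: rest) (fun x => -x.1) (fun x => x.2) with
      | nil => rw [hs] at hsorted; simp at hsorted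
      | cons a u => rw [hs] at hsorted; simp at hsorted; exact ⟨u, by rw [hsorted]⟩
    rw [ht]
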